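-- pv_equiv track=rewrite | github.com/Soohan-Park/Practice-CT-2020 | Week03/DP) 카드 게임.py | solution
-- ===== SOURCE A (Python) =====
-- def solution(left, right):
--     answer = 0
--
--     pl = 0
--     pr = 0
--     isEmpty = lambda p, deck : True if p > len(deck) - 1 else False
--
--     while not isEmpty(pl, left) and not isEmpty(pr, right):
--         if max(left) < right[pr]:
--             pl += 1
--             pr += 1
--         else:
--             if left[pl] > right[pr]:
--                 answer += right[pr]
--                 pr += 1
--             else:
--                 # 아래의 조건문으로는 해결이 안 됨.
--                 if max(left[pl:]) == max(right[pr:]):  # 남은 카드들 중에서 동일한 거!!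
--                     pr += 1
--                 pl += 1
--
--     return answer
-- ===== SOURCE B (Python) =====
-- def _sufmax(xs):
--     # suffix maxima: out[i] == max(xs[i:]); built in one reverse pass
--     cur = None
--     out = []
--     for x in reversed(xs):
--         if cur is None or x > cur:
--             cur = x
--         out.append(cur)
--     out.reverse()
--     return out
--
--
-- def solution(left, right):
--     n, m = len(left), len(right)
--     sufL = _sufmax(left)
--     sufR = _sufmax(right)
--     maxL = sufL[0] if n else 0
--     answer = 0
--     i = j = 0
--     while i < n and j < m:
--         r = right[j]
--         if maxL < r:
--             i += 1
--             j += 1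
--         elif r < left[i]:
--             answer += r
--             j += 1
--         else:
--             if sufL[i] == sufR[j]:
--                 j += 1
--             i += 1
--     return answer
-- ===== Notes on version B (the rewrite author's own statement) =====
-- stated objective: faster
-- what changed: A recomputes max(left), max(left[pl:]) and max(right[pr:]) inside the simulation loop; B precomputes suffix-maximum arrays for both decks in one reverse pass each and the simulation loop does O(1) lookups.
import Mathlib
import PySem

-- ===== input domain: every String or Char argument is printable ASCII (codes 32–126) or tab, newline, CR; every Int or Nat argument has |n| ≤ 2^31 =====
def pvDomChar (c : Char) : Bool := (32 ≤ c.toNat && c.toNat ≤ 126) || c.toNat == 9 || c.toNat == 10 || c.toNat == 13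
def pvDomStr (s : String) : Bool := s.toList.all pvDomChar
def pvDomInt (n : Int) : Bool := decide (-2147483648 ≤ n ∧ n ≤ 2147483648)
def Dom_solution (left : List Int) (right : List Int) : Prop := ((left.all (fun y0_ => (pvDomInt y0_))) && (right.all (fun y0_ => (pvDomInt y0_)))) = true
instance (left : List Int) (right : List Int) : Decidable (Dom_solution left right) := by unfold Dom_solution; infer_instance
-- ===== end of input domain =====

-- B replaces A's per-iteration max() scans over slices by precomputed suffix-maximum
-- arrays, turning the quadratic simulation into a linear one (objective: faster).

-- ===== PORT A =====

-- max(xs) for the nonempty lists A applies it to (under the loop guard every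
-- max() call in A is on a nonempty list; the 0 default is never reached there)
def pyMax (xs : List Int) : Int :=
  match PySem.List.max? xs (fun y => y) with
  | some m => m
  | none => 0

-- isEmpty = lambda p, deck: True if p > len(deck) - 1 else False
def isEmptyP (p : Int) (deck : List Int) : Bool := decide (p > PySem.List.len deck - 1)

-- the while loop of A, pointers pl, pr and accumulator answer as Python ints
def solutionLoop (left right : List Int) (pl pr answer : Int) : Int :=
  if h : (¬ isEmptyP pl left = true) ∧ (¬ isEmptyP pr right = true) then
    if pyMax left < PySem.List.pyGetD right pr 0 then
      solutionLoop left right (pl + 1) (pr + 1) answer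
    else if PySem.List.pyGetD left pl 0 > PySem.List.pyGetD right pr 0 then
      solutionLoop left right pl (pr + 1) (answer + PySem.List.pyGetD right pr 0)
    else if pyMax (PySem.List.slice left (some pl) none)
            = pyMax (PySem.List.slice right (some pr) none) then
      solutionLoop left right (pl + 1) (pr + 1) answer
    else
      solutionLoop left right (pl + 1) pr answer
  else answer
termination_by ((PySem.List.len left - pl) + (PySem.List.len right - pr)).toNat
decreasing_by
  all_goals simp only [isEmptyP, PySem.List.len_eq, decide_eq_true_eq, not_lt] at h ⊢
  all_goals omega

def solution (left : List Int) (right : List Int) : Int :=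
  solutionLoop left right 0 0 0

-- ===== PORT B =====

-- one step of B's reverse pass: running max cur (None before the first element),
-- out built back-to-front (Source B appends then reverses once; prepending is the same)
def sufmaxStep (acc : Option Int × List Int) (x : Int) : Option Int × List Int :=
  let cur := match acc.1 with
    | none => x
    | some c => if x > c then x else c
  (some cur, cur :: acc.2)

-- _sufmax(xs): suffix maxima of xs, one pass over reversed(xs)
def sufmax (xs : List Int) : List Int :=
  (xs.reverse.foldl sufmaxStep (none, [])).2

-- B's while loop: O(1) lookups into the precomputed arrays
def solutionAltLoop (left right sufL sufR : List Int) (maxL : Int) (i j : Nat)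
    (answer : Int) : Int :=
  if h : i < left.length ∧ j < right.length then
    let r := right.getD j 0
    if maxL < r then
      solutionAltLoop left right sufL sufR maxL (i + 1) (j + 1) answer
    else if r < left.getD i 0 then
      solutionAltLoop left right sufL sufR maxL i (j + 1) (answer + r)
    else
      solutionAltLoop left right sufL sufR maxL (i + 1)
        (if sufL.getD i 0 == sufR.getD j 0 then j + 1 else j) answer
  else answer
termination_by (left.length - i) + (right.length - j)
decreasing_by all_goals first | omega | (split <;> omega)

def solution_alt (left : List Int) (right : List Int) : Int :=
  let sufL := sufmax left
  let sufR := sufmax right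
  let maxL := if left.length = 0 then 0 else sufL.getD 0 0
  solutionAltLoop left right sufL sufR maxL 0 0 0

-- ===== PRECONDITION & SPEC =====
def Spec_solution (left : List Int) (right : List Int) (out : Int) : Prop := out = solution_alt left right
instance (left : List Int) (right : List Int) (out : Int) : Decidable (Spec_solution left right out) := by unfold Spec_solution; infer_instance

-- ===== CLAIM (what is proved, stated in full; the proofs are below) =====
def Claim_equal_solution : Prop := ∀ (left : List Int) (right : List Int), Dom_solution left right → Spec_solution left right (solution left right)

-- ===== LEMMAS AND PROOFS =====

lemma foldl_max_max (t : List Int) (a b : Int) :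
    t.foldl max (max a b) = max a (t.foldl max b) := by
  induction t generalizing b with
  | nil => simp
  | cons y t ih =>
    simp only [List.foldl_cons]
    rw [max_assoc, ih]

lemma pyMax_cons (x : Int) (t : List Int) :
    pyMax (x :: t) = t.foldl max x := by
  simp [pyMax, PySem.List.max?_id_cons]

lemma pyMax_cons_cons (x y : Int) (t : List Int) :
    pyMax (x :: y :: t) = max x (pyMax (y :: t)) := by
  rw [pyMax_cons, pyMax_cons, List.foldl_cons]
  exact foldl_max_max t x y

-- specification of the suffix pass: F xs = (some-max-of-xs, list of suffix maxima)
def sufspec : List Int → List Int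
  | [] => []
  | x :: xs => pyMax (x :: xs) :: sufspec xs

lemma sufmax_fold_spec (xs : List Int) :
    xs.reverse.foldl sufmaxStep (none, []) =
      ((if xs = [] then none else some (pyMax xs)), sufspec xs) := by
  induction xs with
  | nil => simp [sufspec]
  | cons x t ih =>
    rw [List.reverse_cons, List.foldl_append, ih]
    cases t with
    | nil => simp [sufmaxStep, sufspec, pyMax, PySem.List.max?]
    | cons y s =>
      simp only [List.foldl_cons, List.foldl_nil, sufmaxStep, sufspec,
        if_neg (List.cons_ne_nil y s), if_neg (List.cons_ne_nil x (y :: s))]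
      have hmax : (if x > pyMax (y :: s) then x else pyMax (y :: s)) = pyMax (x :: y :: s) := by
        rw [pyMax_cons_cons]
        rcases le_or_gt x (pyMax (y :: s)) with h | h
        · rw [if_neg (by omega), max_eq_right h]
        · rw [if_pos h, max_eq_left (le_of_lt h)]
      rw [hmax]

lemma sufmax_eq_sufspec (xs : List Int) : sufmax xs = sufspec xs := by
  rw [sufmax, sufmax_fold_spec]

lemma sufspec_getD (xs : List Int) :
    ∀ i : Nat, i < xs.length → (sufspec xs).getD i 0 = pyMax (xs.drop i) := by
  induction xs with
  | nil => intro i h; simp at h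
  | cons x t ih =>
    intro i h
    cases i with
    | zero => simp [sufspec]
    | succ k =>
      simp only [sufspec, List.getD_cons_succ, List.drop_succ_cons]
      exact ih k (by simpa using h)

lemma sufmax_getD (xs : List Int) (i : Nat) (h : i < xs.length) :
    (sufmax xs).getD i 0 = pyMax (xs.drop i) := by
  rw [sufmax_eq_sufspec]; exact sufspec_getD xs i h

lemma maxL_eq (left : List Int) :
    (if left.length = 0 then 0 else (sufmax left).getD 0 0) = pyMax left := by
  cases left with
  | nil => simp [pyMax, PySem.List.max?]
  | cons x t =>
    rw [if_neg (by simp)]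
    simpa using sufmax_getD (x :: t) 0 (by simp)

lemma loop_eq (left right : List Int) :
    ∀ (k : Nat) (pl pr : Nat) (ans : Int),
      (left.length - pl) + (right.length - pr) ≤ k →
      solutionLoop left right (pl : Int) (pr : Int) ans =
        solutionAltLoop left right (sufmax left) (sufmax right) (pyMax left) pl pr ans := by
  intro k
  induction k with
  | zero =>
    intro pl pr ans hk
    rw [solutionLoop, solutionAltLoop]
    rw [dif_neg, dif_neg] <;>
      simp only [isEmptyP, PySem.List.len_eq, decide_eq_true_eq, not_and, not_lt] <;>
      omega
  | succ k ih =>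
    intro pl pr ans hk
    rw [solutionLoop, solutionAltLoop]
    by_cases hg : pl < left.length ∧ pr < right.length
    · have hga : ¬isEmptyP (pl : Int) left = true := by
        simp only [isEmptyP, PySem.List.len_eq, decide_eq_true_eq]; omega
      have hgb : ¬isEmptyP (pr : Int) right = true := by
        simp only [isEmptyP, PySem.List.len_eq, decide_eq_true_eq]; omega
      rw [dif_pos ⟨hga, hgb⟩, dif_pos hg]
      have hr : PySem.List.pyGetD right (pr : Int) 0 = right.getD pr 0 := by
        simp [PySem.List.pyGetD_natCast]
      have hl : PySem.List.pyGetD left (pl : Int) 0 = left.getD pl 0 := by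
        simp [PySem.List.pyGetD_natCast]
      have hsl : pyMax (PySem.List.slice left (some (pl : Int)) none)
          = (sufmax left).getD pl 0 := by
        rw [PySem.List.slice_from_natCast, sufmax_getD left pl hg.1]
      have hsr : pyMax (PySem.List.slice right (some (pr : Int)) none)
          = (sufmax right).getD pr 0 := by
        rw [PySem.List.slice_from_natCast, sufmax_getD right pr hg.2]
      have e1 : ((pl : Int) + 1) = ((pl + 1 : Nat) : Int) := by push_cast; ring
      have e2 : ((pr : Int) + 1) = ((pr + 1 : Nat) : Int) := by push_cast; ring
      simp only [hr, hl, hsl, hsr, beq_iff_eq, gt_iff_lt]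
      split_ifs with h1 h2 h3
      · rw [e1, e2]; exact ih (pl + 1) (pr + 1) ans (by omega)
      · rw [e2]; exact ih pl (pr + 1) (ans + right.getD pr 0) (by omega)
      · rw [e1, e2]; exact ih (pl + 1) (pr + 1) ans (by omega)
      · rw [e1]; exact ih (pl + 1) pr ans (by omega)
    · rw [dif_neg, dif_neg hg]
      simp only [isEmptyP, PySem.List.len_eq, decide_eq_true_eq, not_and, not_lt]
      omega

-- ===== VERDICT (by name: the statement is the Claim_ definition above) =====
theorem solution_spec : Claim_equal_solution := by
  intro left right _
  unfold Spec_solution solution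
  show solutionLoop left right 0 0 0 =
    solutionAltLoop left right (sufmax left) (sufmax right)
      (if left.length = 0 then 0 else (sufmax left).getD 0 0) 0 0 0
  rw [maxL_eq]
  exact loop_eq left right (left.length + right.length) 0 0 0 (by omega)
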